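-- pv_equiv track=rewrite | github.com/brownbreeze/StudyCodingTest | codility/lesson_8_EquiLeader/solution.py | solution
-- ===== SOURCE A (Python) =====
-- def get_leader(B):
--     B.sort()
--     if len(B)==0: return -1
--     dom = B[len(B)//2] if B.count(B[len(B)//2-1]) < B.count(B[len(B)//2]) else B[len(B)//2-1]
--     if B.count(dom) > len(B)/2.0:
--         return dom
--     return -1
--
-- def solution(A):
--     cnt = 0
--     for i in range(1,len(A)):
--         f = get_leader(A[:i])
--         s = get_leader(A[i:])
--         if f == s and f != -1 :
--             cnt += 1
--     return cnt
-- ===== SOURCE B (Python) =====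
-- def solution(A):
--     n = len(A)
--     # one pass: count occurrences of every value
--     cnt = {}
--     for x in A:
--         cnt[x] = cnt.get(x, 0) + 1
--     # the only possible common leader of both halves is a global leader
--     leader = None
--     for v, c in cnt.items():
--         if 2 * c > n:
--             leader = v
--             break
--     if leader is None:
--         return 0
--     total = cnt[leader]
--     res = 0
--     left = 0
--     for i, x in enumerate(A[:-1]):
--         if x == leader:
--             left += 1
--         if 2 * left > i + 1 and 2 * (total - left) > n - i - 1:
--             res += 1
--     return res
-- ===== Notes on version B (the rewrite author's own statement) =====
-- stated objective: faster
-- what changed: A re-sorts and re-counts every prefix/suffix to find each half's leader (O(n^2 log n)); B counts all values once, picks the unique global majority candidate from the count dict, and counts equi-leader splits in a single prefix-count sweep (O(n)).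
-- intended difference: On arrays where some split is equi-led by the value -1, A conflates that leader with its 'no leader' sentinel -1 and returns 0, while B returns the actual number of such splits, which is the intended EquiLeader count. — e.g. on solution([-1, -1]): A returns 0, B returns 1
import Mathlib
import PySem

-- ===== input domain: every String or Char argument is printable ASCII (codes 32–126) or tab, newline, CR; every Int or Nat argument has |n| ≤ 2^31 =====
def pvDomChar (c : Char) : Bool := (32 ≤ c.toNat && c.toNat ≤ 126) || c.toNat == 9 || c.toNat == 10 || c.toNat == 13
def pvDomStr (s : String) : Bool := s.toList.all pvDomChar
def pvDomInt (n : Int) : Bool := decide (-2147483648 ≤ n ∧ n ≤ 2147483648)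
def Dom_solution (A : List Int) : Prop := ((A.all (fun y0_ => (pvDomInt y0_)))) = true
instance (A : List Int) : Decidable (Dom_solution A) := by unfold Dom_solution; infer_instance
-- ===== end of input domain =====

-- B replaces A's per-split sort-and-count leader search (O(n^2 log n)) by one global count pass
-- plus a single prefix-count sweep (O(n)); A's '.sort()' only mutates temporary slices, so no
-- caller-visible mutation is at stake.

-- ===== PORT A =====
-- get_leader: B.sort() then median-candidate check. Indices n//2 and n//2-1 are always in Python
-- range for a nonempty list (n//2-1 wraps to -1 when n = 1), so pyGetD's default is never used.
-- 'B.count(dom) > len(B)/2.0' compares an integer with a half-integer: exact as n < 2*count.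
def getLeader (B : List Int) : Int :=
  let Bs := PySem.List.sorted B (fun x => x) false
  if Bs.length = 0 then -1
  else
    let n : Int := (Bs.length : Int)
    let bm := PySem.List.pyGetD Bs (PySem.Int.floordiv n 2) 0
    let bm1 := PySem.List.pyGetD Bs (PySem.Int.floordiv n 2 - 1) 0
    let dom := if Bs.count bm1 < Bs.count bm then bm else bm1
    if n < 2 * (Bs.count dom : Int) then dom else -1

def solution (A : List Int) : Int :=
  (PySem.List.pyRange 1 (A.length : Int)).foldl
    (fun cnt i =>
      let f := getLeader (PySem.List.slice A none (some i))
      let s := getLeader (PySem.List.slice A (some i) none)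
      if f = s ∧ f ≠ -1 then cnt + 1 else cnt) 0

-- ===== PORT B =====
-- first (v, c) of the count dict with 2*c > n ('for v, c in cnt.items(): if 2*c > n: ... break')
def findLeader (n : Int) : List (Int × Int) → Option Int
  | [] => none
  | (v, c) :: rest => if n < 2 * c then some v else findLeader n rest

def solution_alt (A : List Int) : Int :=
  let n : Int := (A.length : Int)
  let cnt := A.foldl (fun d x => d.modify x 0 (· + 1)) PySem.Dict.empty
  match findLeader n cnt.items with
  | none => 0
  | some leader =>
    let total := cnt.getD leader 0
    ((PySem.List.enumerate (PySem.List.slice A none (some (-1)))).foldl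
      (fun (st : Int × Int) p =>
        let left := if p.2 = leader then st.1 + 1 else st.1
        let res := if p.1 + 1 < 2 * left ∧ n - p.1 - 1 < 2 * (total - left) then st.2 + 1 else st.2
        (left, res)) ((0 : Int), (0 : Int))).2

-- ===== PRECONDITION & SPEC =====
-- On arrays where some split position is equi-led by the value -1, A conflates that leader with its
-- 'no leader' sentinel -1 and returns 0, while B counts those splits; B's count is the intended
-- EquiLeader answer.
def D_solution (A : List Int) : Prop :=
  ∃ i ∈ List.range A.length,
    1 ≤ i ∧ i < 2 * (A.take i).count (-1) ∧ A.length - i < 2 * (A.drop i).count (-1)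
instance (A : List Int) : Decidable (D_solution A) := by unfold D_solution; infer_instance

def Spec_solution (A : List Int) (out : Int) : Prop := ¬ D_solution A → out = solution_alt A
instance (A : List Int) (out : Int) : Decidable (Spec_solution A out) := by unfold Spec_solution; infer_instance

def pvDiffWitness_solution : List Int := [-1, -1]
def pvDiffWitnessOut_solution : Int × Int := (0, 1)

-- ===== CLAIM (what is proved, stated in full; the proofs are below) =====
def Claim_unchanged_solution : Prop := ∀ (A : List Int), Dom_solution A → Spec_solution A (solution A)
def Claim_changed_solution : Prop := Dom_solution (pvDiffWitness_solution) ∧ D_solution (pvDiffWitness_solution) ∧ solution (pvDiffWitness_solution) = pvDiffWitnessOut_solution.1 ∧ solution_alt (pvDiffWitness_solution) = pvDiffWitnessOut_solution.2 ∧ pvDiffWitnessOut_solution.1 ≠ pvDiffWitnessOut_solution.2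
def Claim_exact_solution : Prop := ∀ (A : List Int), Dom_solution A → D_solution A → solution A ≠ solution_alt A

-- ===== LEMMAS AND PROOFS =====

-- v is a (strict) majority element of l
abbrev Maj (l : List Int) (v : Int) : Prop := l.length < 2 * l.count v

-- the split predicates the two loops count
def pA (A : List Int) (j : Nat) : Bool :=
  decide (getLeader (A.take (j+1)) = getLeader (A.drop (j+1)) ∧ getLeader (A.take (j+1)) ≠ -1)
def pC (A : List Int) (v : Int) (j : Nat) : Bool :=
  decide (Maj (A.take (j+1)) v ∧ Maj (A.drop (j+1)) v)

lemma count_pair_le (l : List Int) (u v : Int) (h : u ≠ v) : l.count u + l.count v ≤ l.length := by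
  induction l with
  | nil => simp
  | cons x t ih =>
    simp only [List.count_cons, List.length_cons]
    by_cases hx : x = u <;> by_cases hy : x = v <;>
      simp_all <;> omega


lemma maj_unique {l : List Int} {u v : Int} (hu : Maj l u) (hv : Maj l v) : u = v := by
  by_contra hne
  have := count_pair_le l u v hne
  unfold Maj at hu hv
  omega


lemma maj_mem {l : List Int} {v : Int} (h : Maj l v) : v ∈ l := by
  have : 0 < l.count v := by unfold Maj at h; have := List.count_le_length (l := l) (a := v); omega
  exact List.count_pos_iff.mp this


lemma maj_take_drop {A : List Int} {v : Int} {i : Nat}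
    (ht : Maj (A.take i) v) (hd : Maj (A.drop i) v) : Maj A v := by
  have hc : A.count v = (A.take i).count v + (A.drop i).count v := by
    conv_lhs => rw [← List.take_append_drop i A, List.count_append]
  have hl : A.length = (A.take i).length + (A.drop i).length := by
    conv_lhs => rw [← List.take_append_drop i A, List.length_append]
  unfold Maj at *
  omega


lemma sorted_median {l : List Int} (hp : l.Pairwise (· ≤ ·)) {v : Int} (h : Maj l v)
    (hm : l.length / 2 < l.length) : l[l.length / 2] = v := by
  set n := l.length with hn
  set m := n / 2 with hmdef
  have hdm : 2 * (n / 2) + n % 2 = n := by omega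
  have hmono : ∀ i j (hi : i < n) (hj : j < n), i ≤ j → l[i] ≤ l[j] := by
    intro i j hi hj hij
    rcases Nat.lt_or_ge i j with h | h
    · exact List.pairwise_iff_getElem.mp hp i j hi hj h
    · have : i = j := by omega
      subst this; exact le_refl _
  by_contra hne
  rcases lt_trichotomy l[m] v with hlt | heq | hgt
  · -- everything in the first m+1 positions is < v
    have hnotin : v ∉ l.take (m+1) := by
      intro hv
      obtain ⟨i, hi, hie⟩ := List.mem_iff_getElem.mp hv
      rw [List.getElem_take] at hie
      have hib : i < min (m+1) n := by simpa [List.length_take, hn] using hi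
      have : l[i] ≤ l[m] := hmono i m (by omega) hm (by omega)
      omega
    have hcount : l.count v = (l.drop (m+1)).count v := by
      conv_lhs => rw [← List.take_append_drop (m+1) l, List.count_append]
      rw [List.count_eq_zero.mpr hnotin]; omega
    have hle : (l.drop (m+1)).count v ≤ n - (m+1) := by
      have h1 := List.count_le_length (l := l.drop (m+1)) (a := v)
      have h2 : (l.drop (m+1)).length = n - (m+1) := by simp [List.length_drop, hn]
      omega
    unfold Maj at h
    omega
  · exact hne heq
  · -- everything from position m on is > v
    have hnotin : v ∉ l.drop m := by
      intro hv
      obtain ⟨i, hi, hie⟩ := List.mem_iff_getElem.mp hv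
      rw [List.getElem_drop] at hie
      have hib : i < n - m := by simpa [List.length_drop, hn] using hi
      have : l[m] ≤ l[m + i] := hmono m (m+i) hm (by omega) (by omega)
      omega
    have hcount : l.count v = (l.take m).count v := by
      conv_lhs => rw [← List.take_append_drop m l, List.count_append]
      rw [List.count_eq_zero.mpr hnotin]; omega
    have hle : (l.take m).count v ≤ m := by
      have h1 := List.count_le_length (l := l.take m) (a := v)
      have h2 : (l.take m).length ≤ m := by simp [List.length_take]
      omega
    unfold Maj at h
    omega


lemma getLeader_of_maj {B : List Int} {v : Int} (h : Maj B v) : getLeader B = v := by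
  have hvB : v ∈ B := maj_mem h
  have hBne : B ≠ [] := List.ne_nil_of_mem hvB
  set Bs := PySem.List.sorted B (fun x => x) false with hBs
  have hlen : Bs.length = B.length := PySem.List.length_sorted B _ false
  have hcnt : ∀ w : Int, Bs.count w = B.count w := fun w =>
    (PySem.List.sorted_perm B (fun x => x) false).count_eq w
  have hMajS : Maj Bs v := by unfold Maj; rw [hlen, hcnt]; exact h
  have hpos : 0 < Bs.length := by rw [hlen]; exact List.length_pos_iff.mpr hBne
  have hm : Bs.length / 2 < Bs.length := Nat.div_lt_self hpos one_lt_two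
  have hBne' : Bs ≠ [] := List.length_pos_iff.mp hpos
  have hmed : Bs[Bs.length / 2] = v :=
    sorted_median (PySem.List.sorted_pairwise B (fun x => x)) hMajS hm
  have hfd : PySem.Int.floordiv ((Bs.length : Int)) 2 = ((Bs.length / 2 : Nat) : Int) := by
    exact_mod_cast PySem.Int.floordiv_natCast Bs.length 2
  have hbm : PySem.List.pyGetD Bs (PySem.Int.floordiv ((Bs.length : Int)) 2) 0 = v := by
    rw [hfd, PySem.List.pyGetD_natCast, List.getD_eq_getElem _ _ hm, hmed]
  have hfin : ((Bs.length : Int)) < 2 * ((Bs.count v : Nat) : Int) := by exact_mod_cast hMajS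
  simp only [getLeader, ← hBs]
  rw [if_neg (by omega)]
  rcases Nat.lt_or_ge Bs.length 2 with h1 | h2
  · -- singleton list: index n//2 - 1 wraps to -1, the last (= only) element
    have hl1 : Bs.length = 1 := by omega
    have hidx : PySem.Int.floordiv ((Bs.length : Int)) 2 - 1 = -1 := by
      rw [hfd, hl1]; simp
    have hbm1 : PySem.List.pyGetD Bs (PySem.Int.floordiv ((Bs.length : Int)) 2 - 1) 0 = v := by
      rw [hidx, PySem.List.pyGetD_neg_one Bs 0 hBne']
      have h01 : Bs.length - 1 < Bs.length := by omega
      have := List.getLast_eq_getElem (l := Bs) hBne'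
      rw [this]
      have h02 : Bs.length - 1 = Bs.length / 2 := by omega
      simp only [h02, hmed]
    rw [hbm, hbm1]
    rw [if_neg (lt_irrefl _), if_pos hfin]
  · have hge : 1 ≤ Bs.length / 2 := by omega
    have hfd2 : PySem.Int.floordiv ((Bs.length : Int)) 2 - 1 = ((Bs.length / 2 - 1 : Nat) : Int) := by
      rw [hfd]; push_cast [hge]; omega
    have hm1 : Bs.length / 2 - 1 < Bs.length := by omega
    have hbm1 : PySem.List.pyGetD Bs (PySem.Int.floordiv ((Bs.length : Int)) 2 - 1) 0
        = Bs[Bs.length / 2 - 1] := by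
      rw [hfd2, PySem.List.pyGetD_natCast, List.getD_eq_getElem _ _ hm1]
    rw [hbm, hbm1]
    by_cases hbv : Bs[Bs.length / 2 - 1] = v
    · rw [hbv]
      rw [if_neg (lt_irrefl _), if_pos hfin]
    · have hlt : Bs.count (Bs[Bs.length / 2 - 1]) < Bs.count v := by
        have := count_pair_le Bs (Bs[Bs.length / 2 - 1]) v hbv
        unfold Maj at hMajS; omega
      rw [if_pos hlt, if_pos hfin]


lemma getLeader_of_not_maj {B : List Int} (h : ∀ v, ¬ Maj B v) : getLeader B = -1 := by
  set Bs := PySem.List.sorted B (fun x => x) false with hBs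
  have hlen : Bs.length = B.length := PySem.List.length_sorted B _ false
  have hcnt : ∀ w : Int, Bs.count w = B.count w := fun w =>
    (PySem.List.sorted_perm B (fun x => x) false).count_eq w
  simp only [getLeader, ← hBs]
  by_cases h0 : Bs.length = 0
  · rw [if_pos h0]
  · rw [if_neg h0]
    set dom := if Bs.count (PySem.List.pyGetD Bs (PySem.Int.floordiv ((Bs.length : Int)) 2 - 1) 0)
        < Bs.count (PySem.List.pyGetD Bs (PySem.Int.floordiv ((Bs.length : Int)) 2) 0)
      then PySem.List.pyGetD Bs (PySem.Int.floordiv ((Bs.length : Int)) 2) 0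
      else PySem.List.pyGetD Bs (PySem.Int.floordiv ((Bs.length : Int)) 2 - 1) 0 with hdom
    have hnm : ¬ Maj B dom := h dom
    have : ¬ ((Bs.length : Int) < 2 * ((Bs.count dom : Nat) : Int)) := by
      unfold Maj at hnm
      rw [hlen, hcnt] at *
      intro hc
      exact hnm (by exact_mod_cast hc)
    rw [if_neg this]


lemma getLeader_cases (B : List Int) :
    (∃ v, Maj B v ∧ getLeader B = v) ∨ getLeader B = -1 := by
  by_cases h : ∃ v, Maj B v
  · obtain ⟨v, hv⟩ := h
    exact Or.inl ⟨v, hv, getLeader_of_maj hv⟩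
  · exact Or.inr (getLeader_of_not_maj (fun v hv => h ⟨v, hv⟩))


lemma foldl_if_count {α : Type} (p : α → Prop) [DecidablePred p] (l : List α) (a : Int) :
    l.foldl (fun c i => if p i then c + 1 else c) a = a + ((l.countP (fun i => decide (p i)) : Nat) : Int) := by
  induction l generalizing a with
  | nil => simp
  | cons x t ih =>
    simp only [List.foldl_cons, List.countP_cons, ih]
    by_cases h : p x <;> simp [h] <;> omega


lemma solution_eq_countP (A : List Int) :
    solution A = (((List.range (A.length - 1)).countP (pA A) : Nat) : Int) := by
  unfold solution
  rw [PySem.List.pyRange_of_pos 1 ((A.length : Int)) one_pos]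
  have h2 : (if (1 : Int) < ((A.length : Int)) then ((((A.length : Int)) - 1 + 1 - 1) / 1).toNat else 0)
      = A.length - 1 := by
    rw [show (((A.length : Int)) - 1 + 1 - 1) / 1 = ((A.length : Int)) - 1 by norm_num]
    split_ifs with h <;> omega
  rw [h2, List.foldl_map]
  rw [foldl_if_count (fun k : Nat =>
    getLeader (PySem.List.slice A none (some (1 + 1 * (k : Int)))) =
        getLeader (PySem.List.slice A (some (1 + 1 * (k : Int))) none) ∧
      getLeader (PySem.List.slice A none (some (1 + 1 * (k : Int)))) ≠ -1)]
  rw [zero_add]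
  congr 1
  exact_mod_cast List.countP_congr (fun k _hk => by
    have ht : PySem.List.slice A none (some (((1 + 1 * k : Nat) : Int))) = A.take (k + 1) := by
      rw [PySem.List.slice_to A (by positivity)]
      congr 1
      omega
    have hd : PySem.List.slice A (some (((1 + 1 * k : Nat) : Int))) none = A.drop (k + 1) := by
      rw [PySem.List.slice_from A (by positivity)]
      congr 1
      omega
    simp only [pA, ht, hd, show Int.negSucc 0 = -1 from rfl])


lemma items_counter_fact (A : List Int) :
    ∀ p ∈ (PySem.Dict.counter A).items, p.2 = ((A.count p.1 : Nat) : Int) := by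
  intro p hp
  obtain ⟨k, v⟩ := p
  have h1 := PySem.Dict.getD_of_mem_items (PySem.Dict.counter A) hp
    (PySem.Dict.nodup_keys_counter A) 0
  rw [PySem.Dict.getD_counter] at h1
  simpa using h1.symm


lemma findLeader_none_aux {A : List Int} (h : ¬ ∃ v, Maj A v) :
    ∀ l : List (Int × Int), (∀ p ∈ l, p.2 = ((A.count p.1 : Nat) : Int)) →
      findLeader (A.length : Int) l = none := by
  intro l
  induction l with
  | nil => intro _; rfl
  | cons hd tl ih =>
    intro hl
    obtain ⟨v, c⟩ := hd
    have hc : c = ((A.count v : Nat) : Int) := hl (v, c) (by simp)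
    have hnm : ¬ ((A.length : Int) < 2 * c) := by
      rw [hc]
      intro hlt
      exact h ⟨v, by exact_mod_cast hlt⟩
    simp only [findLeader, if_neg hnm]
    exact ih (fun p hp => hl p (by simp [hp]))

lemma findLeader_none {A : List Int} (h : ¬ ∃ v, Maj A v) :
    findLeader (A.length : Int) (PySem.Dict.counter A).items = none :=
  findLeader_none_aux h _ (items_counter_fact A)

lemma findLeader_some_aux {A : List Int} {L : Int} (hL : Maj A L) :
    ∀ l : List (Int × Int), (∀ p ∈ l, p.2 = ((A.count p.1 : Nat) : Int)) →
      (L, ((A.count L : Nat) : Int)) ∈ l →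
      findLeader (A.length : Int) l = some L := by
  intro l
  induction l with
  | nil => intro _ hm; simp at hm
  | cons hd tl ih =>
    intro hl hm
    obtain ⟨v, c⟩ := hd
    have hc : c = ((A.count v : Nat) : Int) := hl (v, c) (by simp)
    by_cases hlt : (A.length : Int) < 2 * c
    · have hmv : Maj A v := by rw [hc] at hlt; exact_mod_cast hlt
      simp only [findLeader, if_pos hlt]
      rw [maj_unique hmv hL]
    · simp only [findLeader, if_neg hlt]
      rcases List.mem_cons.mp hm with he | ht
      · exfalso
        rw [Prod.ext_iff] at he
        obtain ⟨hv, hc2⟩ := he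
        simp only at hv hc2
        apply hlt
        rw [← hc2]
        exact_mod_cast hL
      · exact ih (fun p hp => hl p (by simp [hp])) ht

lemma findLeader_some {A : List Int} {L : Int} (hL : Maj A L) :
    findLeader (A.length : Int) (PySem.Dict.counter A).items = some L := by
  have hmem : L ∈ (PySem.Dict.counter A).keys := by
    rw [PySem.Dict.keys_counter, PySem.Set.mem_ofList]
    exact maj_mem hL
  obtain ⟨c, hc⟩ : ∃ c, (PySem.Dict.counter A).get? L = some c := by
    rcases ho : (PySem.Dict.counter A).get? L with _ | c
    · exact absurd ((PySem.Dict.get?_eq_none_iff_not_mem_keys _ L).mp ho) (by simpa using hmem)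
    · exact ⟨c, rfl⟩
  have hi := PySem.Dict.mem_items_of_get?_eq_some _ hc
  have hcval := items_counter_fact A _ hi
  simp only at hcval
  rw [hcval] at hi
  exact findLeader_some_aux hL _ (items_counter_fact A) hi

lemma bfold (A : List Int) (L : Int) :
    ∀ (l : List Int) (k : Nat), A.dropLast.drop k = l → ∀ (res : Int),
    ((PySem.List.enumerate l ((k : Nat) : Int)).foldl
      (fun (st : Int × Int) p =>
        let lf := if p.2 = L then st.1 + 1 else st.1
        let rs := if p.1 + 1 < 2 * lf ∧
            ((A.length : Int)) - p.1 - 1 < 2 * ((((A.count L : Nat) : Int)) - lf)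
          then st.2 + 1 else st.2
        (lf, rs)) ((((A.take k).count L : Nat) : Int), res)).2
      = res + (((List.range' k l.length).countP (pC A L) : Nat) : Int) := by
  intro l
  induction l with
  | nil =>
    intro k _ res
    simp [PySem.List.enumerate]
  | cons x tl ih =>
    intro k hk res
    have hklt : k < A.dropLast.length := by
      have := congrArg List.length hk
      simp only [List.length_drop, List.length_cons] at this
      omega
    rw [List.drop_eq_getElem_cons hklt] at hk
    injection hk with h1 h2
    have hkA : k < A.length := by
      have := List.length_dropLast (xs := A)
      omega
    have hxa : A[k] = x := by rw [← List.getElem_dropLast hklt, h1]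
    -- prefix-count step
    have hcnt : (A.take (k+1)).count L = (A.take k).count L + (if x = L then 1 else 0) := by
      rw [List.take_add_one, List.getElem?_eq_getElem hkA, hxa, List.count_append]
      by_cases hxl : x = L <;> simp [hxl]
    -- split facts for the condition
    have hlen1 : (A.take (k+1)).length = k+1 := by simp [List.length_take]; omega
    have hlen2 : (A.drop (k+1)).length = A.length - (k+1) := by simp [List.length_drop]
    have hsplit : A.count L = (A.take (k+1)).count L + (A.drop (k+1)).count L := by
      conv_lhs => rw [← List.take_append_drop (k+1) A, List.count_append]
    have henum : PySem.List.enumerate (x :: tl) ((k : Nat) : Int)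
        = (((k : Nat) : Int), x) :: PySem.List.enumerate tl (((k+1 : Nat) : Int)) := by
      simp [PySem.List.enumerate]
    rw [henum, List.foldl_cons]
    have hlf : (if x = L then (((A.take k).count L : Nat) : Int) + 1 else (((A.take k).count L : Nat) : Int))
        = (((A.take (k+1)).count L : Nat) : Int) := by
      by_cases hxl : x = L <;> simp [hxl, hcnt]
    have hcond : (((k : Nat) : Int) + 1 < 2 * (((A.take (k+1)).count L : Nat) : Int) ∧
        ((A.length : Int)) - ((k : Nat) : Int) - 1 <
          2 * ((((A.count L : Nat) : Int)) - (((A.take (k+1)).count L : Nat) : Int)))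
        ↔ pC A L k = true := by
      simp only [pC, decide_eq_true_eq]
      unfold Maj
      omega
    simp only [hlf]
    by_cases hc : pC A L k = true
    · rw [if_pos (hcond.mpr hc)]
      rw [ih (k+1) h2 (res + 1)]
      rw [show (x :: tl).length = tl.length + 1 from rfl, List.range'_succ, List.countP_cons_of_pos hc]
      push_cast
      ring
    · rw [if_neg (fun hh => hc (hcond.mp hh))]
      rw [ih (k+1) h2 res]
      rw [show (x :: tl).length = tl.length + 1 from rfl, List.range'_succ, List.countP_cons_of_neg (by simpa using hc)]

lemma alt_eq_countP_of_maj {A : List Int} {L : Int} (hL : Maj A L) :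
    solution_alt A = (((List.range (A.length - 1)).countP (pC A L) : Nat) : Int) := by
  unfold solution_alt
  simp only [← PySem.Dict.counter_eq_foldl, findLeader_some hL, PySem.Dict.getD_counter,
    PySem.List.slice_to_neg_one]
  have hb := bfold A L A.dropLast 0 (by simp) 0
  simp only [Nat.cast_zero, List.take_zero, List.count_nil] at hb
  rw [hb, List.length_dropLast, zero_add, ← List.range_eq_range']

lemma pA_true_imp {A : List Int} {j : Nat} (hpa : pA A j = true) :
    ∃ u, Maj (A.take (j+1)) u ∧ Maj (A.drop (j+1)) u ∧ u ≠ -1 := by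
  simp only [pA, decide_eq_true_eq] at hpa
  obtain ⟨heq, hne⟩ := hpa
  rcases getLeader_cases (A.take (j+1)) with ⟨u, hu, hgl⟩ | hgl
  · rcases getLeader_cases (A.drop (j+1)) with ⟨w, hw, hgl2⟩ | hgl2
    · refine ⟨u, hu, ?_, hgl ▸ hne⟩
      rw [show u = w by rw [← hgl, heq, hgl2]]
      exact hw
    · exact absurd (heq.trans hgl2) (hgl ▸ (hgl ▸ hne))
  · exact absurd hgl hne

lemma sol_eq_zero_of_maj_neg_one {A : List Int} (h : Maj A (-1)) : solution A = 0 := by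
  rw [solution_eq_countP, List.countP_eq_zero.mpr, Nat.cast_zero]
  intro j _ hpa
  obtain ⟨u, h1, h2, h3⟩ := pA_true_imp hpa
  exact h3 (maj_unique (maj_take_drop h1 h2) h)

lemma sol_eq_zero_of_no_maj {A : List Int} (h : ¬ ∃ v, Maj A v) : solution A = 0 := by
  rw [solution_eq_countP, List.countP_eq_zero.mpr, Nat.cast_zero]
  intro j _ hpa
  obtain ⟨u, h1, h2, _⟩ := pA_true_imp hpa
  exact h ⟨u, maj_take_drop h1 h2⟩

lemma alt_eq_zero_of_no_maj {A : List Int} (h : ¬ ∃ v, Maj A v) : solution_alt A = 0 := by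
  unfold solution_alt
  simp only [← PySem.Dict.counter_eq_foldl, findLeader_none h]

lemma countP_pC_neg_one_eq_zero {A : List Int} (hnd : ¬ D_solution A) :
    (List.range (A.length - 1)).countP (pC A (-1)) = 0 := by
  rw [List.countP_eq_zero]
  intro j hj hpc
  simp only [pC, decide_eq_true_eq] at hpc
  obtain ⟨h1, h2⟩ := hpc
  have hjl : j < A.length - 1 := List.mem_range.mp hj
  unfold Maj at h1 h2
  rw [List.length_take] at h1
  rw [List.length_drop] at h2
  exact hnd ⟨j + 1, List.mem_range.mpr (by omega), by omega, by
    have : min (j+1) A.length = j+1 := by omega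
    omega, by omega⟩


-- ===== VERDICT (by name: the statement is the Claim_ definition above) =====
theorem solution_spec : Claim_unchanged_solution := by
  intro A _hdom
  unfold Spec_solution
  intro hnd
  by_cases hex : ∃ v, Maj A v
  · obtain ⟨L, hL⟩ := hex
    by_cases hL1 : L = -1
    · subst hL1
      rw [sol_eq_zero_of_maj_neg_one hL, alt_eq_countP_of_maj hL,
        countP_pC_neg_one_eq_zero hnd, Nat.cast_zero]
    · rw [alt_eq_countP_of_maj hL, solution_eq_countP]
      congr 1
      apply List.countP_congr
      intro j _hj
      constructor
      · intro hpa
        obtain ⟨u, h1, h2, _⟩ := pA_true_imp hpa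
        have huL : u = L := maj_unique (maj_take_drop h1 h2) hL
        subst huL
        simp only [pC, decide_eq_true_eq]
        exact ⟨h1, h2⟩
      · intro hpc
        simp only [pC, decide_eq_true_eq] at hpc
        obtain ⟨m1, m2⟩ := hpc
        simp only [pA, decide_eq_true_eq]
        rw [getLeader_of_maj m1, getLeader_of_maj m2]
        exact ⟨rfl, hL1⟩
  · rw [sol_eq_zero_of_no_maj hex, alt_eq_zero_of_no_maj hex]

theorem solution_changed : Claim_changed_solution := by
  unfold Claim_changed_solution; decide

theorem solution_tight : Claim_exact_solution := by
  intro A _hdom hd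
  unfold D_solution at hd
  obtain ⟨i, hir, h1, h2, h3⟩ := hd
  have hin : i < A.length := List.mem_range.mp hir
  have hmt : Maj (A.take i) (-1) := by unfold Maj; rw [List.length_take]; omega
  have hmd : Maj (A.drop i) (-1) := by unfold Maj; rw [List.length_drop]; omega
  have hmA : Maj A (-1) := maj_take_drop hmt hmd
  rw [sol_eq_zero_of_maj_neg_one hmA, alt_eq_countP_of_maj hmA]
  have hpos : 0 < (List.range (A.length - 1)).countP (pC A (-1)) := by
    rw [List.countP_pos_iff]
    refine ⟨i - 1, List.mem_range.mpr (by omega), ?_⟩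
    simp only [pC, decide_eq_true_eq]
    rw [show i - 1 + 1 = i by omega]
    exact ⟨hmt, hmd⟩
  intro hc
  omega
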